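-- pv_equiv track=rewrite | github.com/RF-Tar-Railt/arknights-toolkit | arknights_toolkit/copper.py | determine_mode_from_coppers
-- ===== SOURCE A (Python) =====
-- def determine_mode_from_coppers(coppers):
--     """根据铜币类型确定图片模式"""
--     if not coppers:
--         return 'normal'
--
--     types = [copper.get('type', 'mid') for copper in coppers]
--
--     # 如果全是 high，返回 nice
--     if all(t == 'high' for t in types):
--         return 'nice'
--     # 如果全是 low，返回 bad
--     elif all(t == 'low' for t in types):
--         return 'bad'
--     else:
--         return 'normal'
-- ===== SOURCE B (Python) =====
-- def determine_mode_from_coppers(coppers):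
--     """根据铜币类型确定图片模式"""
--     if not coppers:
--         return 'normal'
--     all_high = True
--     all_low = True
--     for c in coppers:
--         t = c.get('type', 'mid')
--         all_high = all_high and t == 'high'
--         all_low = all_low and t == 'low'
--         if not (all_high or all_low):
--             return 'normal'
--     return 'nice' if all_high else 'bad'
-- ===== Notes on version B (the rewrite author's own statement) =====
-- stated objective: alternative
-- what changed: Replaces A's intermediate types list plus two full all() scans with a single fused pass carrying two boolean accumulators (all_high/all_low) and an early return 'normal' as soon as both are falsified.
import Mathlib
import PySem

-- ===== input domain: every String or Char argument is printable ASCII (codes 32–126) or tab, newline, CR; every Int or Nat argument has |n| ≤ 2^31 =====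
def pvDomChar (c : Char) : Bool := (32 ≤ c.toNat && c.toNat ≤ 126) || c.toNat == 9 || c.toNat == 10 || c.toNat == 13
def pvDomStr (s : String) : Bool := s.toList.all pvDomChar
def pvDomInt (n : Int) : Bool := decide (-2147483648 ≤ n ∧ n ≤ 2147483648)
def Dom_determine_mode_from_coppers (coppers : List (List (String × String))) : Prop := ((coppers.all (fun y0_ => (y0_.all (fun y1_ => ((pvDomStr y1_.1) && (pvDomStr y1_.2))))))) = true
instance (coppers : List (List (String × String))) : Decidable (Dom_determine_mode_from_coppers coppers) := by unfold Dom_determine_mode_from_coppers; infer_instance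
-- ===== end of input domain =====

-- B fuses A's intermediate types list and two all() scans into one loop with two boolean accumulators and an early exit (alternative, same cost).

-- ===== PORT A =====
def determine_mode_from_coppers (coppers : List (List (String × String))) : String :=
  match coppers with
  | [] => "normal"
  | _ =>
    let types := coppers.map (fun copper => PySem.Dict.getD (PySem.Dict.mk copper) "type" "mid")
    if types.all (fun t => t == "high") then "nice"
    else if types.all (fun t => t == "low") then "bad"
    else "normal"

-- ===== PORT B =====
-- the for-loop of Source B with its two accumulators and the early 'return normal'
def pvAltLoop (cs : List (List (String × String))) (allHigh allLow : Bool) : String :=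
  match cs with
  | [] => if allHigh then "nice" else "bad"
  | c :: rest =>
    let t := PySem.Dict.getD (PySem.Dict.mk c) "type" "mid"
    let allHigh' := allHigh && (t == "high")
    let allLow' := allLow && (t == "low")
    if !(allHigh' || allLow') then "normal"
    else pvAltLoop rest allHigh' allLow'

def determine_mode_from_coppers_alt (coppers : List (List (String × String))) : String :=
  if coppers.isEmpty then "normal"
  else pvAltLoop coppers true true

-- ===== PRECONDITION & SPEC =====
def Spec_determine_mode_from_coppers (coppers : List (List (String × String))) (out : String) : Prop := out = determine_mode_from_coppers_alt coppers
instance (coppers : List (List (String × String))) (out : String) : Decidable (Spec_determine_mode_from_coppers coppers out) := by unfold Spec_determine_mode_from_coppers; infer_instance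

-- ===== CLAIM =====
def Claim_equal_determine_mode_from_coppers : Prop := ∀ (coppers : List (List (String × String))), Dom_determine_mode_from_coppers coppers → Spec_determine_mode_from_coppers coppers (determine_mode_from_coppers coppers)

-- ===== LEMMAS AND PROOFS =====

-- Loop invariant: provided at least one accumulator is still true, the loop computes
-- the staged-scan answer relative to the accumulators.
theorem pvAltLoop_eq (cs : List (List (String × String))) (ah al : Bool) (h : (ah || al) = true) :
    pvAltLoop cs ah al =
      (if ah && cs.all (fun c => PySem.Dict.getD (PySem.Dict.mk c) "type" "mid" == "high") then "nice"
       else if al && cs.all (fun c => PySem.Dict.getD (PySem.Dict.mk c) "type" "mid" == "low") then "bad"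
       else "normal") := by
  induction cs generalizing ah al with
  | nil => cases ah <;> cases al <;> simp_all [pvAltLoop]
  | cons c rest ih =>
    cases hh : (PySem.Dict.getD (PySem.Dict.mk c) "type" "mid" == "high") <;>
    cases hl : (PySem.Dict.getD (PySem.Dict.mk c) "type" "mid" == "low") <;>
    cases ah <;> cases al <;>
      simp_all [pvAltLoop, List.all_cons, ih]

-- ===== VERDICT =====
theorem determine_mode_from_coppers_spec : Claim_equal_determine_mode_from_coppers := by
  intro coppers _
  unfold Spec_determine_mode_from_coppers determine_mode_from_coppers determine_mode_from_coppers_alt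
  cases coppers with
  | nil => rfl
  | cons c cs =>
    rw [pvAltLoop_eq _ true true rfl]
    simp
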